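-- pv_equiv track=rewrite | github.com/hs280/NaiveEntropicMeasures | Bin/sample_lengths.py | enforce_monotonicity
-- ===== SOURCE A (Python) =====
-- def enforce_monotonicity(data, increasing=True):
--     """
--     Enforces monotonicity on the data list.
--     If increasing is True, ensures the data is monotonically increasing.
--     If increasing is False, ensures the data is monotonically decreasing.
--     """
--     if increasing:
--         for i in range(1, len(data)):
--             if data[i] < data[i - 1]:
--                 data[i] = data[i - 1]
--     else:
--         for i in range(1, len(data)):
--             if data[i] > data[i - 1]:
--                 data[i] = data[i - 1]
--     return data
-- ===== SOURCE B (Python) =====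
-- def enforce_monotonicity(data, increasing=True):
--     """Two-stage run-length approach: (1) collect the records — the positions
--     where a new running extremum starts; (2) expand that run-length encoding
--     and splice it back so the same list object is mutated, as the original does."""
--     better = (lambda x, r: x > r) if increasing else (lambda x, r: x < r)
--     records = []
--     for i, x in enumerate(data):
--         if not records or better(x, records[-1][1]):
--             records.append((i, x))
--     bounds = [s for s, _ in records] + [len(data)]
--     out = []
--     for (s, v), e in zip(records, bounds[1:]):
--         out.extend([v] * (e - s))
--     data[:] = out
--     return data
-- ===== Notes on version B (the rewrite author's own statement) =====
-- stated objective: alternative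
-- what changed: Replaced the in-place clamp loop by a two-stage run-length algorithm: first collect the records (positions where a new running extremum starts), then expand that run-length encoding and splice it back in place.
import Mathlib
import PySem

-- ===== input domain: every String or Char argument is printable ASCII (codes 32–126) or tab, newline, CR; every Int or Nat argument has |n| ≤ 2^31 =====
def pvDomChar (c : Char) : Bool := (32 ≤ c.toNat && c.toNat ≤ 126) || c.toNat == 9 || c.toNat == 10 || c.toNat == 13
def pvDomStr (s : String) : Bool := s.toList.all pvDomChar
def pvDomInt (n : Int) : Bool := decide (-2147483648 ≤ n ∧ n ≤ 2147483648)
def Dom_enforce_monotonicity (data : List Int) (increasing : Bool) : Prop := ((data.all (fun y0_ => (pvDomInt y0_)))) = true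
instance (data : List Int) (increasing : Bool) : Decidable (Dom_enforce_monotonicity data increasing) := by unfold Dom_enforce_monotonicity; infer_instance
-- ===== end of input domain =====

-- B replaces A's stateful in-place clamp loop by a two-stage run-length algorithm:
-- collect the strict records (positions where a new running extremum starts), then
-- expand that encoding (in Python spliced back with data[:], the same in-place mutation as A).


-- ===== PORT A =====
-- A: for i in range(1, len(data)): if data[i] <cmp> data[i-1]: data[i] = data[i-1]
def enforce_monotonicity (data : List Int) (increasing : Bool) : List Int :=
  if increasing then
    (PySem.List.pyRange 1 (PySem.List.len data) 1).foldl
      (fun d i =>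
        if PySem.List.pyGetD d i 0 < PySem.List.pyGetD d (i - 1) 0 then
          PySem.List.pySetD d i (PySem.List.pyGetD d (i - 1) 0)
        else d) data
  else
    (PySem.List.pyRange 1 (PySem.List.len data) 1).foldl
      (fun d i =>
        if PySem.List.pyGetD d i 0 > PySem.List.pyGetD d (i - 1) 0 then
          PySem.List.pySetD d i (PySem.List.pyGetD d (i - 1) 0)
        else d) data

-- ===== PORT B =====
-- B: stage 1 collects records = [(i, x)] at every i where x improves on records[-1][1]
--    (`not records or better(...)` ported with ||; pyGetD recs (-1) is records[-1]);
--    stage 2 expands: for (s, v), e in zip(records, bounds[1:]): out += [v] * (e - s).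
def enforce_monotonicity_alt (data : List Int) (increasing : Bool) : List Int :=
  let better : Int → Int → Bool := fun x r =>
    if increasing then decide (x > r) else decide (x < r)
  let records : List (Int × Int) :=
    (PySem.List.enumerate data).foldl
      (fun recs p =>
        if recs.isEmpty || better p.2 (PySem.List.pyGetD recs (-1) (0, 0)).2 then
          recs ++ [p]
        else recs) []
  let bounds : List Int := records.map Prod.fst ++ [PySem.List.len data]
  let out : List Int :=
    (records.zip (PySem.List.slice bounds (some 1) none)).foldl
      (fun out p => out ++ List.replicate (p.2 - p.1.1).toNat p.1.2) []
  out

-- ===== PRECONDITION & SPEC =====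
def Spec_enforce_monotonicity (data : List Int) (increasing : Bool) (out : List Int) : Prop := out = enforce_monotonicity_alt data increasing
instance (data : List Int) (increasing : Bool) (out : List Int) : Decidable (Spec_enforce_monotonicity data increasing out) := by unfold Spec_enforce_monotonicity; infer_instance

-- ===== CLAIM (what is proved, stated in full; the proofs are below) =====
def Claim_equal_enforce_monotonicity : Prop := ∀ (data : List Int) (increasing : Bool), Dom_enforce_monotonicity data increasing → Spec_enforce_monotonicity data increasing (enforce_monotonicity data increasing)

-- ===== LEMMAS AND PROOFS =====

-- the running value A carries through its loop, as a pure scan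
def pvScan (f : Int → Int → Int) : Int → List Int → List Int
  | _, [] => []
  | prev, x :: xs => let v := f prev x; v :: pvScan f v xs

lemma pv_getD_append_cons (pre : List Int) (p : Int) (rest : List Int) :
    (pre ++ p :: rest).getD pre.length 0 = p := by
  simp [List.getD]

lemma pv_getD_append_cons_succ (pre : List Int) (p x : Int) (t : List Int) :
    (pre ++ p :: x :: t).getD (pre.length + 1) 0 = x := by
  induction pre with
  | nil => rfl
  | cons a pre _ => simp

lemma pv_set_append_cons_succ (pre : List Int) (p x v : Int) (t : List Int) :
    (pre ++ p :: x :: t).set (pre.length + 1) v = pre ++ p :: v :: t := by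
  induction pre with
  | nil => simp
  | cons a pre ih => simp [ih]

-- A's loop, started after an already-processed prefix `pre ++ [p]`, is the scan
lemma pv_loop_eq (cmp : Int → Int → Bool) (xs : List Int) :
    ∀ (pre : List Int) (p : Int),
    (PySem.List.pyRange ((pre.length + 1 : Nat) : Int) ((pre.length + 1 + xs.length : Nat) : Int) 1).foldl
      (fun d i =>
        if cmp (PySem.List.pyGetD d i 0) (PySem.List.pyGetD d (i - 1) 0) = true then
          PySem.List.pySetD d i (PySem.List.pyGetD d (i - 1) 0)
        else d) (pre ++ p :: xs)
    = pre ++ p :: pvScan (fun prev x => if cmp x prev = true then prev else x) p xs := by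
  induction xs with
  | nil =>
    intro pre p
    rw [PySem.List.pyRange_one_eq_nil (by simp)]
    simp [pvScan]
  | cons x t ih =>
    intro pre p
    have hab : ((pre.length + 1 : Nat) : Int) < ((pre.length + 1 + (x :: t).length : Nat) : Int) := by
      simp only [List.length_cons]; omega
    rw [PySem.List.pyRange_one_cons hab]
    have hidx : ((pre.length + 1 : Nat) : Int) - 1 = ((pre.length : Nat) : Int) := by push_cast; omega
    simp only [List.foldl_cons, hidx, PySem.List.pyGetD_natCast, PySem.List.pySetD_natCast,
      pv_getD_append_cons, pv_getD_append_cons_succ, pv_set_append_cons_succ]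
    have e1 : (((pre ++ [p]).length + 1 : Nat) : Int) = ((pre.length + 1 : Nat) : Int) + 1 := by
      simp only [List.length_append, List.length_cons, List.length_nil]; omega
    have e2 : (((pre ++ [p]).length + 1 + t.length : Nat) : Int)
        = ((pre.length + 1 + (x :: t).length : Nat) : Int) := by
      simp only [List.length_append, List.length_cons, List.length_nil]; omega
    by_cases h : cmp x p = true
    · have H := ih (pre ++ [p]) p
      rw [e1, e2] at H
      simp only [pvScan, h, if_true]
      simpa using H
    · have H := ih (pre ++ [p]) x
      rw [e1, e2] at H
      simp only [pvScan, h]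
      simpa using H

lemma pv_em_eq_scan (cmp : Int → Int → Bool) (data : List Int) :
    (PySem.List.pyRange 1 (PySem.List.len data) 1).foldl
      (fun d i =>
        if cmp (PySem.List.pyGetD d i 0) (PySem.List.pyGetD d (i - 1) 0) = true then
          PySem.List.pySetD d i (PySem.List.pyGetD d (i - 1) 0)
        else d) data
    = match data with
      | [] => data
      | x :: xs => x :: pvScan (fun prev x => if cmp x prev = true then prev else x) x xs := by
  cases data with
  | nil =>
    rw [PySem.List.pyRange_one_eq_nil (by simp [PySem.List.len])]
    rfl
  | cons x xs =>
    have H := pv_loop_eq cmp xs [] x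
    have e2 : ((([] : List Int).length + 1 + xs.length : Nat) : Int) = PySem.List.len (x :: xs) := by
      simp only [PySem.List.len_eq, List.length_nil, List.length_cons]; omega
    rw [e2] at H
    simpa using H

-- B's stage-1 loop, written as a recursion on the remaining input (carry = last record value)
def pvTailRecs (better : Int → Int → Bool) : List Int → Int → Int → List (Int × Int)
  | [], _, _ => []
  | x :: xs, i, v => if better x v then (i, x) :: pvTailRecs better xs (i + 1) x
                     else pvTailRecs better xs (i + 1) v

-- B's stage-2 expansion of the records from (s, v) on, with total length n
def pvExpTail (sv : Int × Int) (rest : List (Int × Int)) (n : Int) : List Int :=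
  ((sv :: rest).zip (rest.map Prod.fst ++ [n])).foldl
    (fun out p => out ++ List.replicate (p.2 - p.1.1).toNat p.1.2) []

lemma pv_stage1_eq (better : Int → Int → Bool) (xs : List Int) :
    ∀ (i : Int) (pre : List (Int × Int)) (s v : Int),
    (PySem.List.enumerate xs i).foldl
      (fun recs p =>
        if recs.isEmpty || better p.2 (PySem.List.pyGetD recs (-1) ((0 : Int), (0 : Int))).2 then
          recs ++ [p]
        else recs) (pre ++ [(s, v)])
    = pre ++ (s, v) :: pvTailRecs better xs i v := by
  induction xs with
  | nil => intro i pre s v; simp [PySem.List.enumerate_nil, pvTailRecs]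
  | cons x t ih =>
    intro i pre s v
    rw [PySem.List.enumerate_cons, List.foldl_cons]
    have hlast : PySem.List.pyGetD (pre ++ [(s, v)]) (-1) ((0 : Int), (0 : Int)) = (s, v) :=
      PySem.List.pyGetD_neg_one_append_singleton pre (s, v) _
    have hne : (pre ++ [(s, v)]).isEmpty = false := by simp
    rw [hlast, hne]
    simp only [Bool.false_or]
    by_cases h : better x v = true
    · rw [if_pos h]
      have H := ih (i + 1) (pre ++ [(s, v)]) i x
      rw [List.append_assoc] at H
      simp only [pvTailRecs, h, if_true]
      simpa using H
    · rw [if_neg h]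
      have H := ih (i + 1) pre s v
      simp only [pvTailRecs, h]
      exact H

lemma pv_foldl_append_replicate (ps : List ((Int × Int) × Int)) :
    ∀ (acc : List Int),
    ps.foldl (fun out p => out ++ List.replicate (p.2 - p.1.1).toNat p.1.2) acc
    = acc ++ ps.foldl (fun out p => out ++ List.replicate (p.2 - p.1.1).toNat p.1.2) [] := by
  induction ps with
  | nil => intro acc; simp
  | cons p t ih =>
    intro acc
    rw [List.foldl_cons, List.foldl_cons, ih, ih (([] : List Int) ++ _)]
    simp

lemma pv_exptail_eq_scan (better : Int → Int → Bool) (f : Int → Int → Int)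
    (hf1 : ∀ v x, better x v = true → f v x = x)
    (hf2 : ∀ v x, better x v = false → f v x = v) (xs : List Int) :
    ∀ (i s v : Int), s ≤ i →
    pvExpTail (s, v) (pvTailRecs better xs i v) ((i + xs.length : Int))
    = List.replicate (i - s).toNat v ++ pvScan f v xs := by
  induction xs with
  | nil =>
    intro i s v hsi
    simp [pvExpTail, pvTailRecs, pvScan]
  | cons x t ih =>
    intro i s v hsi
    by_cases h : better x v = true
    · have hstep : pvTailRecs better (x :: t) i v = (i, x) :: pvTailRecs better t (i + 1) x := by
        simp [pvTailRecs, h]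
      rw [hstep]
      have H := ih (i + 1) i x (by omega)
      have hn : ((i + 1) + (t.length : Int)) = i + ((x :: t).length : Int) := by
        simp only [List.length_cons]; push_cast; omega
      rw [hn] at H
      -- peel the first run (from s to i) off the expansion
      have hexp : pvExpTail (s, v) ((i, x) :: pvTailRecs better t (i + 1) x) (i + ((x :: t).length : Int))
          = List.replicate (i - s).toNat v
            ++ pvExpTail (i, x) (pvTailRecs better t (i + 1) x) (i + ((x :: t).length : Int)) := by
        unfold pvExpTail
        rw [show ((i, x) :: pvTailRecs better t (i + 1) x).map Prod.fst ++ [i + ((x :: t).length : Int)]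
              = i :: ((pvTailRecs better t (i + 1) x).map Prod.fst ++ [i + ((x :: t).length : Int)]) by simp]
        rw [List.zip_cons_cons, List.foldl_cons, pv_foldl_append_replicate]
        simp
      rw [hexp, H]
      have hfx : f v x = x := hf1 v x h
      simp [pvScan, hfx]
    · have hb : better x v = false := by simpa using h
      have hstep : pvTailRecs better (x :: t) i v = pvTailRecs better t (i + 1) v := by
        simp [pvTailRecs, hb]
      rw [hstep]
      have H := ih (i + 1) s v (by omega)
      have hn : ((i + 1) + (t.length : Int)) = i + ((x :: t).length : Int) := by
        simp only [List.length_cons]; push_cast; omega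
      rw [hn] at H
      rw [H]
      have hrep : List.replicate ((i + 1) - s).toNat v
          = List.replicate (i - s).toNat v ++ [v] := by
        have : ((i + 1) - s).toNat = (i - s).toNat + 1 := by omega
        rw [this, List.replicate_succ']
      rw [hrep]
      have hfx : f v x = v := hf2 v x hb
      simp [pvScan, hfx]

-- B on any input, reduced to the scan
lemma pv_alt_eq_scan (data : List Int) (increasing : Bool) (f : Int → Int → Int)
    (hf1 : ∀ v x, (if increasing then decide (x > v) else decide (x < v)) = true → f v x = x)
    (hf2 : ∀ v x, (if increasing then decide (x > v) else decide (x < v)) = false → f v x = v) :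
    enforce_monotonicity_alt data increasing
    = match data with
      | [] => []
      | x :: xs => x :: pvScan f x xs := by
  cases data with
  | nil => rfl
  | cons x xs =>
    unfold enforce_monotonicity_alt
    set better : Int → Int → Bool := fun x r =>
      if increasing then decide (x > r) else decide (x < r) with hbetter
    have h1 : (PySem.List.enumerate (x :: xs) 0).foldl
        (fun recs p =>
          if recs.isEmpty || better p.2 (PySem.List.pyGetD recs (-1) ((0 : Int), (0 : Int))).2 then
            recs ++ [p]
          else recs) []
        = (0, x) :: pvTailRecs better xs 1 x := by
      rw [PySem.List.enumerate_cons, List.foldl_cons]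
      simpa using pv_stage1_eq better xs 1 [] 0 x
    simp only [h1]
    rw [PySem.List.slice_from_one]
    have hn : PySem.List.len (x :: xs) = (1 : Int) + (xs.length : Int) := by
      simp [PySem.List.len_eq]; omega
    rw [hn]
    have H := pv_exptail_eq_scan better f (fun v y => hf1 v y) (fun v y => hf2 v y) xs 1 0 x
      (by omega)
    unfold pvExpTail at H
    simpa using H

-- ===== VERDICT (by name: the statement is the Claim_ definition above) =====
theorem enforce_monotonicity_spec : Claim_equal_enforce_monotonicity := by
  intro data increasing _
  unfold Spec_enforce_monotonicity
  unfold enforce_monotonicity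
  cases increasing with
  | true =>
    rw [if_pos rfl]
    have HA := pv_em_eq_scan (fun a b => decide (a < b)) data
    simp only [decide_eq_true_eq] at HA
    rw [HA]
    rw [pv_alt_eq_scan data true (fun prev x => if x < prev then prev else x)
      (by intro v x h; simp at h ⊢; omega) (by intro v x h; simp at h ⊢; omega)]
    cases data <;> rfl
  | false =>
    rw [if_neg (by decide)]
    have HA := pv_em_eq_scan (fun a b => decide (a > b)) data
    simp only [decide_eq_true_eq] at HA
    rw [HA]
    rw [pv_alt_eq_scan data false (fun prev x => if x > prev then prev else x)
      (by intro v x h; simp at h ⊢; omega) (by intro v x h; simp at h ⊢; omega)]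
    cases data <;> rfl
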